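-- pv_equiv track=rewrite | github.com/LOGIC-10/CriticSearch | conversation_histories/convert_to_sharegpt.py | split_conversations_by_answer
-- ===== SOURCE A (Python) =====
-- def split_conversations_by_answer(conversations):
--     """
--     根据<answer>标签将对话列表分割成多个子对话列表
--
--     Args:
--         conversations (list): 原始的对话列表，每个元素是一个包含conversations键的字典
--
--     Returns:
--         list: 分割后的多个对话列表，每个列表包含到<answer>标签为止的对话内容，格式为：
--         [
--             {
--                 "conversations": [...],
--             },
--             ...
--         ]
--     """
--     if not conversations:
--         return []
--
--     result_conversations = []
--
--     for conv_dict in conversations: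
--         conv_list = conv_dict.get("conversations", [])
--         temp_list = []
--
--         for item in conv_list:
--             temp_list.append(item)
--             # 检查当前项是否包含<answer>标签
--             if item.get("from") == "gpt" and "<answer>" in item.get("value", ""):
--                 # 找到<answer>标签，将当前累积的对话添加到结果中
--                 if temp_list:
--                     result_conversations.append({
--                         "conversations": temp_list,
--                     })
--                     temp_list = []
--
--         # 如果还有剩余的对话项，也添加到结果中
--         if temp_list:
--             result_conversations.append({
--                 "conversations": temp_list,
--             })
--
--     return result_conversations
-- ===== SOURCE B (Python) =====
-- def split_chunks(conv_list):
--     """Recursive decomposition: find the first <answer> gpt item, slice off the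
--     chunk ending there (inclusive), recurse on the remainder."""
--     for i, item in enumerate(conv_list):
--         if item.get("from") == "gpt" and "<answer>" in item.get("value", ""):
--             return [conv_list[:i + 1]] + split_chunks(conv_list[i + 1:])
--     return [conv_list] if conv_list else []
--
--
-- def split_conversations_by_answer(conversations):
--     return [{"conversations": chunk}
--             for conv_dict in conversations
--             for chunk in split_chunks(conv_dict.get("conversations", []))]
-- ===== Notes on version B (the rewrite author's own statement) =====
-- stated objective: alternative
-- what changed: Replaces A's stateful accumulate-and-flush loop (temp_list grown item by item and emptied at each boundary) with a recursive find-first-boundary-then-slice helper plus one flat comprehension over the conversations.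
import Mathlib
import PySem

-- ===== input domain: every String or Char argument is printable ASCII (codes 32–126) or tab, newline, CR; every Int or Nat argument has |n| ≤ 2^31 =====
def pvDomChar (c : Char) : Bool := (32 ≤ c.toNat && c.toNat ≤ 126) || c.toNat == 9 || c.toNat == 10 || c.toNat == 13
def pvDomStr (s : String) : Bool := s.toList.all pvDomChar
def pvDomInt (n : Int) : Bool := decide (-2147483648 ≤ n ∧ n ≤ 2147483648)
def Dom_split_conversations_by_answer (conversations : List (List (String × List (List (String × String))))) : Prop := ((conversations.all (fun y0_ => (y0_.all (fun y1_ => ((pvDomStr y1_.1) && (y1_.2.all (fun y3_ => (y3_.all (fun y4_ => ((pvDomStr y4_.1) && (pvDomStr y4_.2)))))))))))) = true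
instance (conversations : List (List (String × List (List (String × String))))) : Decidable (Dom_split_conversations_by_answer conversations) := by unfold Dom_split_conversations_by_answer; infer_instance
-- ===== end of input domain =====

-- B replaces A's stateful accumulate-and-flush loop by a recursive find-first-boundary-
-- then-slice helper plus one flat comprehension; this file proves the two return values
-- equal (objective: alternative).

-- ===== PORT A =====
-- shared boundary test: `item.get("from") == "gpt" and "<answer>" in item.get("value", "")`
def hasAnswer (item : List (String × String)) : Bool :=
  (item.lookup "from" == some "gpt") && PySem.Str.isIn "<answer>" ((item.lookup "value").getD "")

-- body of A's inner `for item in conv_list` loop (state = (result_conversations, temp_list))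
def stepA (st : List (List (String × List (List (String × String)))) × List (List (String × String)))
    (item : List (String × String)) :
    List (List (String × List (List (String × String)))) × List (List (String × String)) :=
  let temp := st.2 ++ [item]
  if hasAnswer item then
    (if temp ≠ [] then (st.1 ++ [[("conversations", temp)]], []) else (st.1, temp))
  else (st.1, temp)

-- A's trailing `if temp_list:` flush after the inner loop
def flushA (st : List (List (String × List (List (String × String)))) × List (List (String × String))) :
    List (List (String × List (List (String × String)))) :=
  if st.2 ≠ [] then st.1 ++ [[("conversations", st.2)]] else st.1

def split_conversations_by_answer (conversations : List (List (String × List (List (String × String))))) : List (List (String × List (List (String × String)))) :=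
  if conversations = [] then [] else
  conversations.foldl (fun result conv_dict =>
    flushA ((((conv_dict.lookup "conversations").getD []).foldl stepA (result, []))))
    []

-- ===== PORT B =====
-- Source B's split_chunks: the `for i, item in enumerate(...)` with an early return at the
-- first boundary is ported as findIdx?; the nonnegative slices conv_list[:i+1] /
-- conv_list[i+1:] are take/drop (exact here: PySem.List.slice_to_natCast / slice_from_natCast).
def splitChunks (conv_list : List (List (String × String))) : List (List (List (String × String))) :=
  match h : conv_list.findIdx? hasAnswer with
  | some i => conv_list.take (i + 1) :: splitChunks (conv_list.drop (i + 1))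
  | none => if conv_list ≠ [] then [conv_list] else []
termination_by conv_list.length
decreasing_by
  have : i < conv_list.length := by
    rw [List.findIdx?_eq_some_iff_findIdx_eq] at h; omega
  simp [List.length_drop]; omega

-- the flat comprehension of Source B's split_conversations_by_answer
def split_conversations_by_answer_alt (conversations : List (List (String × List (List (String × String))))) : List (List (String × List (List (String × String)))) :=
  conversations.flatMap (fun conv_dict =>
    (splitChunks ((conv_dict.lookup "conversations").getD [])).map
      (fun chunk => [("conversations", chunk)]))

-- ===== PRECONDITION & SPEC =====
def Spec_split_conversations_by_answer (conversations : List (List (String × List (List (String × String))))) (out : List (List (String × List (List (String × String))))) : Prop := out = split_conversations_by_answer_alt conversations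
instance (conversations : List (List (String × List (List (String × String))))) (out : List (List (String × List (List (String × String))))) : Decidable (Spec_split_conversations_by_answer conversations out) := by unfold Spec_split_conversations_by_answer; infer_instance

-- ===== CLAIM (what is proved, stated in full; the proofs are below) =====
def Claim_equal_split_conversations_by_answer : Prop := ∀ (conversations : List (List (String × List (List (String × String))))), Dom_split_conversations_by_answer conversations → Spec_split_conversations_by_answer conversations (split_conversations_by_answer conversations)

-- ===== LEMMAS AND PROOFS =====

-- element-wise recursive specification of how one conversation list is chunked
def specChunks (l : List (List (String × String))) : List (List (List (String × String))) :=
  match l with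
  | [] => []
  | x :: xs =>
    if hasAnswer x then [x] :: specChunks xs
    else match specChunks xs with
      | [] => [[x]]
      | c :: cs => (x :: c) :: cs

def wrapC (c : List (List (String × String))) : List (String × List (List (String × String))) :=
  [("conversations", c)]

-- "temp_list carried into the rest of the loop": prepend temp to the first chunk
def glue (temp : List (List (String × String))) (cs : List (List (List (String × String)))) : List (List (List (String × String))) :=
  if temp = [] then cs else
    match cs with
    | [] => [temp]
    | c :: rest => (temp ++ c) :: rest

lemma glue_snoc (temp : List (List (String × String))) (x : List (String × String)) (cs : List (List (List (String × String)))) :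
    glue (temp ++ [x]) cs =
      glue temp (match cs with | [] => [[x]] | c :: rest => (x :: c) :: rest) := by
  cases cs with
  | nil => by_cases h : temp = [] <;> simp [glue, h]
  | cons c rest => by_cases h : temp = [] <;> simp [glue, h]

-- A's inner loop with its trailing flush, from an arbitrary (res, temp) state
lemma innerA_eq (l : List (List (String × String)))
    (res : List (List (String × List (List (String × String))))) (temp : List (List (String × String))) :
    flushA (l.foldl stepA (res, temp)) = res ++ (glue temp (specChunks l)).map wrapC := by
  induction l generalizing res temp with
  | nil => by_cases h : temp = [] <;> simp [flushA, h, glue, wrapC, specChunks]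
  | cons x xs ih =>
    by_cases hx : hasAnswer x
    · have hstep : stepA (res, temp) x = (res ++ [[("conversations", temp ++ [x])]], []) := by
        simp [stepA, hx]
      rw [List.foldl_cons, hstep, ih]
      by_cases h : temp = [] <;> simp [specChunks, hx, glue, h, wrapC]
    · have hstep : stepA (res, temp) x = (res, temp ++ [x]) := by
        simp [stepA, hx]
      rw [List.foldl_cons, hstep, ih, glue_snoc]
      simp [specChunks, hx]

-- element-wise specChunks, characterised at the first boundary index
lemma specChunks_some (l : List (List (String × String))) (i : Nat)
    (h : l.findIdx? hasAnswer = some i) :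
    specChunks l = l.take (i + 1) :: specChunks (l.drop (i + 1)) := by
  induction l generalizing i with
  | nil => simp at h
  | cons x xs ih =>
    rw [List.findIdx?_cons] at h
    by_cases hx : hasAnswer x
    · simp only [hx, if_pos] at h
      injection h with h; subst h
      simp [specChunks, hx]
    · simp only [hx, Bool.false_eq_true, if_neg, not_false_iff, Option.map_eq_some_iff] at h
      obtain ⟨j, hj, rfl⟩ := h
      rw [show specChunks (x :: xs) = (match specChunks xs with
            | [] => [[x]] | c :: cs => (x :: c) :: cs) from by simp [specChunks, hx]]
      rw [ih j hj]
      simp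

-- no boundary anywhere: a single chunk (or nothing for the empty list)
lemma specChunks_none (l : List (List (String × String)))
    (h : l.findIdx? hasAnswer = none) :
    specChunks l = if l ≠ [] then [l] else [] := by
  induction l with
  | nil => simp [specChunks]
  | cons x xs ih =>
    rw [List.findIdx?_cons] at h
    by_cases hx : hasAnswer x
    · simp [hx] at h
    · simp only [hx, Bool.false_eq_true, if_neg, not_false_iff, Option.map_eq_none_iff] at h
      rw [show specChunks (x :: xs) = (match specChunks xs with
            | [] => [[x]] | c :: cs => (x :: c) :: cs) from by simp [specChunks, hx]]
      rw [ih h]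
      cases xs <;> simp

-- B's recursive slicing produces exactly the element-wise chunks
lemma splitChunks_eq_specChunks (l : List (List (String × String))) :
    splitChunks l = specChunks l := by
  fun_induction splitChunks l with
  | case1 l i h ih => rw [specChunks_some l i h, ih]
  | case2 l h hne => rw [specChunks_none l h, if_pos hne]
  | case3 l h hne =>
    have : l = [] := by by_contra hc; exact hne hc
    subst this; simp [specChunks]

-- ===== VERDICT (by name: the statement is the Claim_ definition above) =====
theorem split_conversations_by_answer_spec : Claim_equal_split_conversations_by_answer := by
  intro conversations _
  unfold Spec_split_conversations_by_answer split_conversations_by_answer split_conversations_by_answer_alt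
  by_cases h : conversations = []
  · subst h; simp
  · rw [if_neg h]
    have hfg : (fun (result : List (List (String × List (List (String × String)))))
        (conv_dict : List (String × List (List (String × String)))) =>
        flushA ((((conv_dict.lookup "conversations").getD []).foldl stepA (result, []))))
        = (fun result conv_dict => result ++
            (splitChunks ((conv_dict.lookup "conversations").getD [])).map
              (fun chunk => [("conversations", chunk)])) := by
      funext res d
      rw [innerA_eq, splitChunks_eq_specChunks]
      simp [glue, wrapC]
    rw [hfg, PySem.List.foldl_append_eq_flatMap]
    simp
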